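-- pv_equiv track=rewrite | github.com/AllKinds/posl | hmmtagger/prob_builder.py | calc_gram_counts
-- ===== SOURCE A (Python) =====
-- from collections import Counter
--
-- def calc_gram_counts(sentences, n=2, start_state="<s>", end_state="</s>", delim="_"):
--     all_grams = [[] for _ in range(n)]
--     for sen in sentences:
--         tags = [start_state, *[tag for _, tag in sen], end_state]
--         for order in range(n):
--             ngrams = generate_ngrams(tags, order+1)
--             ngrams_strings = list(map(lambda ngram: delim.join(ngram), ngrams))
--             all_grams[order].extend(ngrams_strings)
--
--     all_grams_counts = list(map(lambda grams: Counter(grams), all_grams))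
--     return all_grams_counts
--
-- def generate_ngrams(input_list, n):
--     return list(zip(*[input_list[i:] for i in range(n)]))
-- ===== SOURCE B (Python) =====
-- from collections import Counter
--
-- def calc_gram_counts(sentences, n=2, start_state="<s>", end_state="</s>", delim="_"):
--     counts = [Counter() for _ in range(n)]
--     if n < 1:
--         return counts
--     for sen in sentences:
--         tags = [start_state, *[tag for _, tag in sen], end_state]
--         L = len(tags)
--         for i in range(L):
--             gram = tags[i]
--             counts[0][gram] += 1
--             for order in range(1, n):
--                 if i + order >= L:
--                     break
--                 gram = gram + delim + tags[i + order]
--                 counts[order][gram] += 1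
--     return counts
-- ===== Notes on version B (the rewrite author's own statement) =====
-- stated objective: alternative
-- what changed: B makes one pass per sentence position, extending each n-gram incrementally from the lower-order one and streaming increments into per-order Counters, instead of A's per-order zip-of-slices passes that materialize every n-gram list before counting.
import Mathlib
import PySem

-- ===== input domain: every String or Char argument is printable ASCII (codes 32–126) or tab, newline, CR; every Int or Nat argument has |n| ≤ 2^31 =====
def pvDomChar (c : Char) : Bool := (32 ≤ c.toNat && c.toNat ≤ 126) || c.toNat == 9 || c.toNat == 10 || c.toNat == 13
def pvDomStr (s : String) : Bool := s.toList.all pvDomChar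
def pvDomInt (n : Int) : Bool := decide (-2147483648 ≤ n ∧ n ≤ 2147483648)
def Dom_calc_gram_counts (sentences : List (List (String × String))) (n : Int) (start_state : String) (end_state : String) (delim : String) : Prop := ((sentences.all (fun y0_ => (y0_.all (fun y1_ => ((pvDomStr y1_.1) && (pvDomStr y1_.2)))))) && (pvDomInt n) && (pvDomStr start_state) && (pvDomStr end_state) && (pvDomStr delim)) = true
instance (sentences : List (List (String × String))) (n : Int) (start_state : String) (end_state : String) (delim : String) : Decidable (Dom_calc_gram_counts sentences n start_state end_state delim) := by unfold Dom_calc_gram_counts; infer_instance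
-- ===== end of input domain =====

-- B builds every counter in a single pass over each sentence, extending each n-gram
-- incrementally from the lower-order one, instead of A's per-order zip-of-slices passes
-- (objective: alternative decomposition, same asymptotic cost).

-- ===== PORT A =====
-- exact port of zip(*lists): truncates at the shortest list; zip() of no lists is []
def pyZipN (ls : List (List String)) : List (List String) :=
  if ls.isEmpty then []
  else if ls.any List.isEmpty then []
  else ls.map (fun l => l.headD "") :: pyZipN (ls.map List.tail)
termination_by (ls.headD []).length
decreasing_by
  cases ls with
  | nil => simp at *
  | cons h t =>
    simp_all
    cases h with
    | nil => simp_all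
    | cons a l => simp

def generate_ngrams (input_list : List String) (n : Int) : List (List String) :=
  pyZipN ((PySem.List.pyRange 0 n 1).map (fun i => PySem.List.slice input_list (some i) none))

def calc_gram_counts (sentences : List (List (String × String))) (n : Int) (start_state : String) (end_state : String) (delim : String) : List (List (String × Int)) :=
  let all_grams0 : List (List String) := (PySem.List.pyRange 0 n 1).map (fun _ => ([] : List String))
  let all_grams := sentences.foldl (fun all_grams sen =>
    let tags : List String := start_state :: (sen.map (fun p => p.2) ++ [end_state])
    (PySem.List.pyRange 0 n 1).foldl (fun ag order =>
      let ngrams := generate_ngrams tags (order + 1)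
      let ngrams_strings := ngrams.map (fun ngram => PySem.Str.join delim ngram)
      PySem.List.pySetD ag order (PySem.List.pyGetD ag order [] ++ ngrams_strings)) all_grams) all_grams0
  all_grams.map (fun grams => (PySem.Dict.counter grams).items)

-- ===== PORT B =====
-- the break-driven inner loop 'for order in range(1, n): if i+order >= L: break; …'
def bOrders (delim : String) (tags : List String) (L n i : Int) (order : Int) (gram : String)
    (counts : List (PySem.Dict String Int)) : List (PySem.Dict String Int) :=
  if h : order < n then
    if L ≤ i + order then counts
    else
      let gram' := gram ++ delim ++ PySem.List.pyGetD tags (i + order) ""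
      let counts' := PySem.List.pySetD counts order
        ((PySem.List.pyGetD counts order PySem.Dict.empty).modify gram' 0 (fun v => v + 1))
      bOrders delim tags L n i (order + 1) gram' counts'
  else counts
termination_by (n - order).toNat
decreasing_by omega

def calc_gram_counts_alt (sentences : List (List (String × String))) (n : Int) (start_state : String) (end_state : String) (delim : String) : List (List (String × Int)) :=
  let counts0 : List (PySem.Dict String Int) := (PySem.List.pyRange 0 n 1).map (fun _ => PySem.Dict.empty)
  if n < 1 then counts0.map (fun c => c.items)
  else
    let counts := sentences.foldl (fun counts sen =>
      let tags : List String := start_state :: (sen.map (fun p => p.2) ++ [end_state])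
      let L : Int := (tags.length : Int)
      (PySem.List.pyRange 0 L 1).foldl (fun counts i =>
        let gram := PySem.List.pyGetD tags i ""
        let counts1 := PySem.List.pySetD counts 0
          ((PySem.List.pyGetD counts 0 PySem.Dict.empty).modify gram 0 (fun v => v + 1))
        bOrders delim tags L n i 1 gram counts1) counts) counts0
    counts.map (fun c => c.items)

-- ===== PRECONDITION & SPEC =====
def Spec_calc_gram_counts (sentences : List (List (String × String))) (n : Int) (start_state : String) (end_state : String) (delim : String) (out : List (List (String × Int))) : Prop := out = calc_gram_counts_alt sentences n start_state end_state delim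
instance (sentences : List (List (String × String))) (n : Int) (start_state : String) (end_state : String) (delim : String) (out : List (List (String × Int))) : Decidable (Spec_calc_gram_counts sentences n start_state end_state delim out) := by unfold Spec_calc_gram_counts; infer_instance

-- ===== CLAIM (what is proved, stated in full; the proofs are below) =====
def Claim_equal_calc_gram_counts : Prop := ∀ (sentences : List (List (String × String))) (n : Int) (start_state : String) (end_state : String) (delim : String), Dom_calc_gram_counts sentences n start_state end_state delim → Spec_calc_gram_counts sentences n start_state end_state delim (calc_gram_counts sentences n start_state end_state delim)

-- ===== LEMMAS AND PROOFS =====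

-- proof helpers
def pvBump (d : PySem.Dict String Int) (g : String) : PySem.Dict String Int := d.modify g 0 (fun v => v + 1)

def pvWin (delim : String) (tags : List String) (i k : Nat) : String :=
  PySem.Str.join delim ((tags.drop i).take (k + 1))

-- the order-o gram stream of one tag list, for start positions ≥ a
def pvWins (delim : String) (tags : List String) (a o : Int) : List String :=
  (PySem.List.pyRange a ((tags.length : Int) - o) 1).map (fun i => pvWin delim tags i.toNat o.toNat)

def pvTags (start_state end_state : String) (sen : List (String × String)) : List String :=
  start_state :: (sen.map (fun p => p.2) ++ [end_state])

-- the canonical order-o stream of the whole corpus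
def pvStream (sentences : List (List (String × String))) (start_state end_state delim : String) (o : Int) : List String :=
  sentences.flatMap (fun sen => pvWins delim (pvTags start_state end_state sen) 0 o)

theorem pvHeads_take (xs : List String) (m : Nat) (hm : m ≤ xs.length) :
    (List.range m).map (fun i => (xs.drop i).headD "") = xs.take m := by
  apply List.ext_getElem?
  intro j
  by_cases hj : j < m
  · rw [List.getElem?_map, List.getElem?_range hj]
    have hjl : j < xs.length := lt_of_lt_of_le hj hm
    simp [List.headD_eq_head?_getD, List.head?_drop, hj, hjl]
  · rw [List.getElem?_eq_none (by simpa using hj), List.getElem?_eq_none]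
    simp [hm]
    omega

theorem pvZip_drops (m : Nat) (hm : 1 ≤ m) : ∀ (xs : List String),
    pyZipN ((List.range m).map (fun i => xs.drop i)) =
      (List.range (xs.length + 1 - m)).map (fun i => (xs.drop i).take m) := by
  intro xs
  induction xs with
  | nil =>
    rw [pyZipN]
    have h1 : ((List.range m).map (fun i => (([] : List String)).drop i)).isEmpty = false := by
      cases m with
      | zero => omega
      | succ m' => simp [List.range_succ_eq_map]
    have h2 : ((List.range m).map (fun i => (([] : List String)).drop i)).any List.isEmpty = true := by
      cases m with
      | zero => omega
      | succ m' => simp [List.range_succ_eq_map]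
    rw [h1, h2]
    simp
    omega
  | cons x xt ih =>
    by_cases hL : (x :: xt).length < m
    · simp only [List.length_cons] at hL
      rw [pyZipN]
      have h2 : ((List.range m).map (fun i => ((x :: xt)).drop i)).any List.isEmpty = true := by
        rw [List.any_eq_true]
        refine ⟨[], ?_, by simp⟩
        rw [List.mem_map]
        refine ⟨xt.length + 1, ?_, by simp⟩
        rw [List.mem_range]
        omega
      rw [h2]
      have h0 : xt.length + 1 + 1 - m = 0 := by omega
      simp [h0]
    · simp only [List.length_cons] at hL
      push_neg at hL
      rw [pyZipN]
      have h1 : ((List.range m).map (fun i => ((x :: xt)).drop i)).isEmpty = false := by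
      -- range m nonempty since 1 ≤ m
        cases m with
        | zero => omega
        | succ m' => simp [List.range_succ_eq_map]
      have h2 : ((List.range m).map (fun i => ((x :: xt)).drop i)).any List.isEmpty = false := by
        rw [List.any_eq_false]
        intro l hl
        rw [List.mem_map] at hl
        obtain ⟨i, hi, rfl⟩ := hl
        rw [List.mem_range] at hi
        simp [List.isEmpty_iff, List.drop_eq_nil_iff]
        omega
      rw [h1, h2]
      simp only [Bool.false_eq_true, if_false]
      have hheads : ((List.range m).map (fun i => ((x :: xt)).drop i)).map (fun l => l.headD "")
          = (x :: xt).take m := by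
        rw [List.map_map]
        exact pvHeads_take (x :: xt) m (by simp; omega)
      have htails : ((List.range m).map (fun i => ((x :: xt)).drop i)).map List.tail
          = (List.range m).map (fun i => xt.drop i) := by
        rw [List.map_map]
        apply List.map_congr_left
        intro i _
        simp [List.tail_drop]
      rw [hheads, htails, ih]
      have hlen : (x :: xt).length + 1 - m = (xt.length + 1 - m) + 1 := by
        simp
        omega
      rw [hlen, List.range_succ_eq_map, List.map_cons, List.map_map]
      congr 1

theorem pvGen_eq (tags : List String) (k : Nat) :
    generate_ngrams tags ((k : Int) + 1) =
      (List.range (tags.length - k)).map (fun i => (tags.drop i).take (k + 1)) := by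
  unfold generate_ngrams
  have hr : PySem.List.pyRange 0 ((k : Int) + 1) 1 = (List.range (k + 1)).map (fun j : Nat => (j : Int)) := by
    rw [PySem.List.pyRange_one]
    have ht : ((k : Int) + 1 - 0).toNat = k + 1 := by omega
    rw [ht]
    apply List.map_congr_left
    intro j _
    simp
  rw [hr, List.map_map]
  have hs : ((fun i => PySem.List.slice tags (some i) none) ∘ fun j : Nat => (j : Int))
      = fun j : Nat => tags.drop j := by
    funext j
    simp [PySem.List.slice_from_natCast]
  rw [hs]
  have := pvZip_drops (k + 1) (by omega) tags
  rw [this]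
  have hn : tags.length + 1 - (k + 1) = tags.length - k := by omega
  rw [hn]

theorem pvChars_join_snoc (sep t : List Char) : ∀ (ys : List (List Char)), ys ≠ [] →
    PySem.Chars.join sep (ys ++ [t]) = PySem.Chars.join sep ys ++ sep ++ t := by
  intro ys
  induction ys with
  | nil => simp
  | cons p rest ih =>
    intro _
    cases rest with
    | nil => simp [PySem.Chars.join_cons_cons, PySem.Chars.join_singleton]
    | cons q rest2 =>
      have h2 : ((q :: rest2) ++ [t] : List (List Char)) = q :: (rest2 ++ [t]) := by simp
      calc PySem.Chars.join sep ((p :: q :: rest2) ++ [t])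
          = p ++ sep ++ PySem.Chars.join sep ((q :: rest2) ++ [t]) := by
            simpa using PySem.Chars.join_cons_cons sep p q (rest2 ++ [t])
        _ = p ++ sep ++ (PySem.Chars.join sep (q :: rest2) ++ sep ++ t) := by
            rw [ih (by simp)]
        _ = PySem.Chars.join sep (p :: q :: rest2) ++ sep ++ t := by
            rw [PySem.Chars.join_cons_cons]; simp [List.append_assoc]

theorem pvJoin_snoc (delim t : String) (ys : List String) (h : ys ≠ []) :
    PySem.Str.join delim (ys ++ [t]) = PySem.Str.join delim ys ++ delim ++ t := by
  rw [← String.toList_inj]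
  simp only [PySem.Str.toList_join, String.toList_append, List.map_append, List.map_cons, List.map_nil]
  exact pvChars_join_snoc delim.toList t.toList (ys.map String.toList) (by simpa using h)

theorem pvJoin_single (delim t : String) : PySem.Str.join delim [t] = t := by
  rw [← String.toList_inj]
  simp [PySem.Str.toList_join, PySem.Chars.join_singleton]

theorem pvWin_zero (delim : String) (tags : List String) (a : Nat) (ha : a < tags.length) :
    pvWin delim tags a 0 = tags.getD a "" := by
  unfold pvWin
  have h1 : (tags.drop a).take 1 = [tags.getD a ""] := by
    rw [List.take_succ]
    simp [List.getElem?_drop, List.getD_eq_getElem?_getD, List.getElem?_eq_getElem ha]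
  rw [h1, pvJoin_single]

theorem pvWin_succ (delim : String) (tags : List String) (i a : Nat) (ha : 1 ≤ a)
    (h : i + a < tags.length) :
    pvWin delim tags i a = pvWin delim tags i (a - 1) ++ delim ++ tags.getD (i + a) "" := by
  unfold pvWin
  have h1 : (tags.drop i).take (a + 1) = (tags.drop i).take a ++ [tags.getD (i + a) ""] := by
    rw [List.take_succ]
    simp [List.getElem?_drop, List.getD_eq_getElem?_getD, List.getElem?_eq_getElem h]
  have h2 : (tags.drop i).take a ≠ [] := by
    have : ((tags.drop i).take a).length = min a (tags.length - i) := by simp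
    intro hc
    rw [hc] at this
    simp at this
    omega
  rw [h1, pvJoin_snoc delim _ _ h2]
  have h3 : a - 1 + 1 = a := by omega
  rw [h3]

theorem pvGetElem?_map_pyRange {τ : Type} (f : Int → τ) (n : Int) (j : Nat) :
    ((PySem.List.pyRange 0 n 1).map f)[j]? = if (j : Int) < n then some (f j) else none := by
  rw [PySem.List.pyRange_one, List.map_map]
  by_cases h : (j : Int) < n
  · rw [if_pos h, List.getElem?_map, List.getElem?_range (by omega : j < (n - 0).toNat)]
    simp
  · rw [if_neg h, List.getElem?_map, List.getElem?_eq_none (by simp; omega)]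
    simp

theorem pvSetD_map_pyRange {τ : Type} (f : Int → τ) (n a : Int) (v : τ) (h0 : 0 ≤ a) (h : a < n) :
    PySem.List.pySetD ((PySem.List.pyRange 0 n 1).map f) a v =
      (PySem.List.pyRange 0 n 1).map (fun o => if o = a then v else f o) := by
  have hlen : ((PySem.List.pyRange 0 n 1).map f).length = (n - 0).toNat := by
    simp [PySem.List.length_pyRange_one]
  have hset : PySem.List.pySetD ((PySem.List.pyRange 0 n 1).map f) a v
      = ((PySem.List.pyRange 0 n 1).map f).set a.toNat v := by
    unfold PySem.List.pySetD PySem.List.pySet? PySem.List.pyIdx?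
    rw [hlen]
    have hc1 : (0 : Int) ≤ a := h0
    have hc2 : a < ((n - 0).toNat : Int) := by omega
    simp [hc1, hc2, h]
  rw [hset]
  apply List.ext_getElem?
  intro j
  rw [List.getElem?_set]
  by_cases hj : (j : Int) < n
  · rw [pvGetElem?_map_pyRange f n j, pvGetElem?_map_pyRange (fun o => if o = a then v else f o) n j,
      if_pos hj, if_pos hj]
    by_cases hja : a.toNat = j
    · have hja' : (j : Int) = a := by omega
      rw [if_pos hja, if_pos (by rw [hlen]; omega), if_pos hja']
    · have hja' : ¬ ((j : Int) = a) := by omega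
      rw [if_neg hja, if_neg hja']
  · rw [pvGetElem?_map_pyRange f n j, pvGetElem?_map_pyRange (fun o => if o = a then v else f o) n j,
      if_neg hj, if_neg hj]
    have hja : ¬ (a.toNat = j) := by omega
    rw [if_neg hja]

theorem pvFoldl_setD_pyRange {τ : Type} (g : Int → τ → τ) (d : τ) (n : Int) (a : Int) (f : Int → τ) (h0 : 0 ≤ a) :
    (PySem.List.pyRange a n 1).foldl
        (fun s o => PySem.List.pySetD s o (g o (PySem.List.pyGetD s o d)))
        ((PySem.List.pyRange 0 n 1).map f)
      = (PySem.List.pyRange 0 n 1).map (fun o => if a ≤ o then g o (f o) else f o) := by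
  by_cases han : n ≤ a
  · rw [PySem.List.pyRange_one_eq_nil han, List.foldl_nil]
    apply List.map_congr_left
    intro o ho
    rw [PySem.List.mem_pyRange_one] at ho
    rw [if_neg (by omega)]
  · push_neg at han
    rw [PySem.List.pyRange_one_cons han, List.foldl_cons,
      PySem.List.pyGetD_map_pyRange_of_nonneg f n a d h0 han,
      pvSetD_map_pyRange f n a (g a (f a)) h0 han,
      pvFoldl_setD_pyRange g d n (a + 1) (fun o => if o = a then g a (f a) else f o) (by omega)]
    apply List.map_congr_left
    intro o ho
    rw [PySem.List.mem_pyRange_one] at ho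
    show (if a + 1 ≤ o then g o (if o = a then g a (f a) else f o) else (if o = a then g a (f a) else f o))
        = (if a ≤ o then g o (f o) else f o)
    by_cases hoa : o = a
    · subst hoa
      rw [if_neg (by omega), if_pos rfl, if_pos (le_refl o)]
    · simp only [if_neg hoa]
      by_cases hao : a ≤ o
      · rw [if_pos (by omega), if_pos hao]
      · rw [if_neg (by omega), if_neg hao]
termination_by (n - a).toNat
decreasing_by omega

theorem pvBOrders_eq (delim : String) (tags : List String) (n i : Int) (hi : 0 ≤ i)
    (a : Int) (gram : String) (f : Int → PySem.Dict String Int) (ha : 1 ≤ a)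
    (hia : i + a ≤ (tags.length : Int))
    (hg : gram = PySem.Str.join delim ((tags.drop i.toNat).take a.toNat)) :
    bOrders delim tags (tags.length : Int) n i a gram ((PySem.List.pyRange 0 n 1).map f)
      = (PySem.List.pyRange 0 n 1).map (fun o =>
          if a ≤ o ∧ i + o < (tags.length : Int)
          then pvBump (f o) (pvWin delim tags i.toNat o.toNat) else f o) := by
  rw [bOrders]
  by_cases han : a < n
  · rw [dif_pos han]
    by_cases hbr : (tags.length : Int) ≤ i + a
    · rw [if_pos hbr]
      apply List.map_congr_left
      intro o ho
      rw [PySem.List.mem_pyRange_one] at ho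
      rw [if_neg (by omega)]
    · rw [if_neg hbr]
      push_neg at hbr
      simp only []
      have hgram' : gram ++ delim ++ PySem.List.pyGetD tags (i + a) ""
          = pvWin delim tags i.toNat a.toNat := by
        have h1 : PySem.List.pyGetD tags (i + a) "" = tags.getD (i.toNat + a.toNat) "" := by
          rw [PySem.List.pyGetD_eq_getElem tags "" (by omega) (by omega)]
          rw [List.getD_eq_getElem?_getD,
            List.getElem?_eq_getElem (by omega : i.toNat + a.toNat < tags.length)]
          congr 1
          omega
        rw [pvWin_succ delim tags i.toNat a.toNat (by omega) (by omega), h1]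
        have h2 : a.toNat - 1 + 1 = a.toNat := by omega
        rw [hg]
        unfold pvWin
        rw [h2]
      rw [PySem.List.pyGetD_map_pyRange_of_nonneg f n a PySem.Dict.empty (by omega) han]
      rw [pvSetD_map_pyRange f n a _ (by omega) han]
      rw [pvBOrders_eq delim tags n i hi (a + 1)
            (gram ++ delim ++ PySem.List.pyGetD tags (i + a) "")
            (fun o => if o = a
              then (f a).modify (gram ++ delim ++ PySem.List.pyGetD tags (i + a) "") 0 (fun v => v + 1)
              else f o)
            (by omega) (by omega)
            (by rw [hgram']; unfold pvWin; congr 2; omega)]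
      apply List.map_congr_left
      intro o ho
      rw [PySem.List.mem_pyRange_one] at ho
      show (if a + 1 ≤ o ∧ i + o < (tags.length : Int)
              then pvBump (if o = a then (f a).modify (gram ++ delim ++ PySem.List.pyGetD tags (i + a) "") 0 (fun v => v + 1) else f o) (pvWin delim tags i.toNat o.toNat)
              else (if o = a then (f a).modify (gram ++ delim ++ PySem.List.pyGetD tags (i + a) "") 0 (fun v => v + 1) else f o))
          = (if a ≤ o ∧ i + o < (tags.length : Int)
              then pvBump (f o) (pvWin delim tags i.toNat o.toNat) else f o)
      by_cases hoa : o = a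
      · subst hoa
        rw [if_neg (by omega), if_pos rfl, if_pos (by constructor <;> omega)]
        rw [hgram']
        rfl
      · simp only [if_neg hoa]
        by_cases hc : a ≤ o ∧ i + o < (tags.length : Int)
        · rw [if_pos (by omega), if_pos hc]
        · rw [if_neg (by omega), if_neg hc]
  · rw [dif_neg han]
    apply List.map_congr_left
    intro o ho
    rw [PySem.List.mem_pyRange_one] at ho
    rw [if_neg (by omega)]
termination_by (n - a).toNat
decreasing_by omega

theorem pvILoop (delim : String) (tags : List String) (n : Int) (hn : 1 ≤ n)
    (a : Int) (f : Int → PySem.Dict String Int) (h0 : 0 ≤ a) :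
    (PySem.List.pyRange a (tags.length : Int) 1).foldl
        (fun counts i =>
          let gram := PySem.List.pyGetD tags i ""
          let counts1 := PySem.List.pySetD counts 0
            ((PySem.List.pyGetD counts 0 PySem.Dict.empty).modify gram 0 (fun v => v + 1))
          bOrders delim tags (tags.length : Int) n i 1 gram counts1)
        ((PySem.List.pyRange 0 n 1).map f)
      = (PySem.List.pyRange 0 n 1).map (fun o => (pvWins delim tags a o).foldl pvBump (f o)) := by
  by_cases haL : (tags.length : Int) ≤ a
  · rw [PySem.List.pyRange_one_eq_nil haL, List.foldl_nil]
    apply List.map_congr_left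
    intro o ho
    rw [PySem.List.mem_pyRange_one] at ho
    unfold pvWins
    rw [PySem.List.pyRange_one_eq_nil (by omega), List.map_nil, List.foldl_nil]
  · push_neg at haL
    rw [PySem.List.pyRange_one_cons haL, List.foldl_cons]
    simp only []
    have hgram : PySem.List.pyGetD tags a "" = pvWin delim tags a.toNat 0 := by
      rw [pvWin_zero delim tags a.toNat (by omega),
        PySem.List.pyGetD_eq_getElem tags "" h0 (by omega),
        List.getD_eq_getElem?_getD, List.getElem?_eq_getElem (by omega : a.toNat < tags.length)]
      rfl
    rw [PySem.List.pyGetD_map_pyRange_of_nonneg f n 0 PySem.Dict.empty (le_refl 0) (by omega)]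
    rw [pvSetD_map_pyRange f n 0 _ (le_refl 0) (by omega)]
    rw [pvBOrders_eq delim tags n a h0 1 (PySem.List.pyGetD tags a "")
          (fun o => if o = 0
            then (f 0).modify (PySem.List.pyGetD tags a "") 0 (fun v => v + 1)
            else f o)
          (le_refl 1) (by omega)
          (by rw [hgram]; rfl)]
    rw [pvILoop delim tags n hn (a + 1)
          (fun o => if 1 ≤ o ∧ a + o < (tags.length : Int)
            then pvBump (if o = 0 then (f 0).modify (PySem.List.pyGetD tags a "") 0 (fun v => v + 1) else f o) (pvWin delim tags a.toNat o.toNat)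
            else (if o = 0 then (f 0).modify (PySem.List.pyGetD tags a "") 0 (fun v => v + 1) else f o))
          (by omega)]
    apply List.map_congr_left
    intro o ho
    rw [PySem.List.mem_pyRange_one] at ho
    show (pvWins delim tags (a + 1) o).foldl pvBump
          (if 1 ≤ o ∧ a + o < (tags.length : Int)
            then pvBump (if o = 0 then (f 0).modify (PySem.List.pyGetD tags a "") 0 (fun v => v + 1) else f o) (pvWin delim tags a.toNat o.toNat)
            else (if o = 0 then (f 0).modify (PySem.List.pyGetD tags a "") 0 (fun v => v + 1) else f o))
        = (pvWins delim tags a o).foldl pvBump (f o)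
    by_cases hcut : a + o < (tags.length : Int)
    · have hwins : pvWins delim tags a o = pvWin delim tags a.toNat o.toNat :: pvWins delim tags (a + 1) o := by
        unfold pvWins
        rw [PySem.List.pyRange_one_cons (by omega)]
        rfl
      rw [hwins, List.foldl_cons]
      by_cases ho0 : o = 0
      · subst ho0
        rw [if_neg (by omega), if_pos rfl]
        rw [hgram]
        rfl
      · rw [if_pos (by constructor <;> omega), if_neg ho0]
    · have h1 : pvWins delim tags a o = [] := by
        unfold pvWins
        rw [PySem.List.pyRange_one_eq_nil (by omega)]
        rfl
      have h2 : pvWins delim tags (a + 1) o = [] := by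
        unfold pvWins
        rw [PySem.List.pyRange_one_eq_nil (by omega)]
        rfl
      have ho0 : ¬ (o = 0) := by omega
      rw [h1, h2, List.foldl_nil, List.foldl_nil,
        if_neg (by omega), if_neg ho0]
termination_by ((tags.length : Int) - a).toNat
decreasing_by omega

theorem pvWins_nonneg (delim : String) (tags : List String) (o : Int) (ho : 0 ≤ o) :
    pvWins delim tags 0 o
      = (List.range (tags.length - o.toNat)).map (fun i => pvWin delim tags i o.toNat) := by
  unfold pvWins
  rw [PySem.List.pyRange_one]
  rw [List.map_map]
  have hl : ((tags.length : Int) - o - 0).toNat = tags.length - o.toNat := by omega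
  rw [hl]
  apply List.map_congr_left
  intro j _
  simp

theorem pvAStrings (delim : String) (tags : List String) (o : Int) (ho : 0 ≤ o) :
    (generate_ngrams tags (o + 1)).map (fun ngram => PySem.Str.join delim ngram)
      = pvWins delim tags 0 o := by
  have hoc : ((o.toNat : Int)) = o := by omega
  rw [← hoc, pvGen_eq tags o.toNat, List.map_map,
    pvWins_nonneg delim tags ((o.toNat : Int)) (by omega)]
  simp only [Int.toNat_natCast]
  apply List.map_congr_left
  intro i _
  rfl

theorem pvAFold (n : Int) (start_state end_state delim : String) :
    ∀ (sentences : List (List (String × String))) (f : Int → List String),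
    sentences.foldl (fun all_grams sen =>
        let tags : List String := start_state :: (sen.map (fun p => p.2) ++ [end_state])
        (PySem.List.pyRange 0 n 1).foldl (fun ag order =>
          let ngrams := generate_ngrams tags (order + 1)
          let ngrams_strings := ngrams.map (fun ngram => PySem.Str.join delim ngram)
          PySem.List.pySetD ag order (PySem.List.pyGetD ag order [] ++ ngrams_strings)) all_grams)
      ((PySem.List.pyRange 0 n 1).map f)
    = (PySem.List.pyRange 0 n 1).map (fun o =>
        f o ++ pvStream sentences start_state end_state delim o) := by
  intro sentences
  induction sentences with
  | nil =>
    intro f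
    rw [List.foldl_nil]
    apply List.map_congr_left
    intro o _
    unfold pvStream
    simp
  | cons sen rest ih =>
    intro f
    rw [List.foldl_cons]
    simp only []
    rw [pvFoldl_setD_pyRange
          (fun o v => v ++ (generate_ngrams (start_state :: (sen.map (fun p => p.2) ++ [end_state])) (o + 1)).map (fun ngram => PySem.Str.join delim ngram))
          [] n 0 f (le_refl 0)]
    rw [ih]
    apply List.map_congr_left
    intro o ho
    rw [PySem.List.mem_pyRange_one] at ho
    show (if 0 ≤ o then f o ++ (generate_ngrams (start_state :: (sen.map (fun p => p.2) ++ [end_state])) (o + 1)).map (fun ngram => PySem.Str.join delim ngram) else f o)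
          ++ pvStream rest start_state end_state delim o
        = f o ++ pvStream (sen :: rest) start_state end_state delim o
    rw [if_pos ho.1]
    unfold pvStream pvTags
    rw [List.flatMap_cons, pvAStrings delim _ o ho.1]
    rw [List.append_assoc]

theorem pvA_eq (sentences : List (List (String × String))) (n : Int) (start_state end_state delim : String) :
    calc_gram_counts sentences n start_state end_state delim
      = (PySem.List.pyRange 0 n 1).map (fun o =>
          (PySem.Dict.counter (pvStream sentences start_state end_state delim o)).items) := by
  unfold calc_gram_counts
  simp only []
  rw [pvAFold n start_state end_state delim sentences (fun _ => [])]
  rw [List.map_map]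
  apply List.map_congr_left
  intro o _
  simp

theorem pvBFold (n : Int) (hn : 1 ≤ n) (start_state end_state delim : String) :
    ∀ (sentences : List (List (String × String))) (f : Int → PySem.Dict String Int),
    sentences.foldl (fun counts sen =>
        let tags : List String := start_state :: (sen.map (fun p => p.2) ++ [end_state])
        let L : Int := (tags.length : Int)
        (PySem.List.pyRange 0 L 1).foldl (fun counts i =>
          let gram := PySem.List.pyGetD tags i ""
          let counts1 := PySem.List.pySetD counts 0
            ((PySem.List.pyGetD counts 0 PySem.Dict.empty).modify gram 0 (fun v => v + 1))
          bOrders delim tags L n i 1 gram counts1) counts)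
      ((PySem.List.pyRange 0 n 1).map f)
    = (PySem.List.pyRange 0 n 1).map (fun o =>
        (pvStream sentences start_state end_state delim o).foldl pvBump (f o)) := by
  intro sentences
  induction sentences with
  | nil =>
    intro f
    rw [List.foldl_nil]
    apply List.map_congr_left
    intro o _
    unfold pvStream
    simp
  | cons sen rest ih =>
    intro f
    rw [List.foldl_cons]
    simp only []
    rw [pvILoop delim (start_state :: (sen.map (fun p => p.2) ++ [end_state])) n hn 0 f (le_refl 0)]
    rw [ih]
    apply List.map_congr_left
    intro o _
    unfold pvStream pvTags
    rw [List.flatMap_cons, List.foldl_append]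

theorem pvB_eq (sentences : List (List (String × String))) (n : Int) (start_state end_state delim : String) :
    calc_gram_counts_alt sentences n start_state end_state delim
      = (PySem.List.pyRange 0 n 1).map (fun o =>
          (PySem.Dict.counter (pvStream sentences start_state end_state delim o)).items) := by
  unfold calc_gram_counts_alt
  simp only []
  by_cases hn : n < 1
  · rw [if_pos hn, PySem.List.pyRange_one_eq_nil (by omega)]
    rfl
  · push_neg at hn
    rw [if_neg (by omega)]
    rw [pvBFold n hn start_state end_state delim sentences (fun _ => PySem.Dict.empty)]
    rw [List.map_map]
    apply List.map_congr_left
    intro o _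
    show ((pvStream sentences start_state end_state delim o).foldl pvBump PySem.Dict.empty).items
        = (PySem.Dict.counter (pvStream sentences start_state end_state delim o)).items
    rw [PySem.Dict.counter_eq_foldl]
    rfl

-- ===== VERDICT (by name: the statement is the Claim_ definition above) =====
theorem calc_gram_counts_spec : Claim_equal_calc_gram_counts := by
  intro sentences n s e d _
  unfold Spec_calc_gram_counts
  rw [pvA_eq, pvB_eq]
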